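-- pv_equiv track=rewrite | github.com/anyoptimization/pymoo | pymoo/util/dominator.py | get_relation
-- ===== SOURCE A (Python) =====
-- def get_relation(a, b, cva=None, cvb=None):
--
--     if cva is not None and cvb is not None:
--         if cva < cvb:
--             return 1
--         elif cvb < cva:
--             return -1
--
--     val = 0
--     for i in range(len(a)):
--         if a[i] < b[i]:
--             # indifferent because once better and once worse
--             if val == -1:
--                 return 0
--             val = 1
--         elif b[i] < a[i]:
--             # indifferent because once better and once worse
--             if val == 1:
--                 return 0
--             val = -1
--     return val
-- ===== SOURCE B (Python) =====
-- def get_relation(a, b, cva=None, cvb=None):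
--     if cva is not None and cvb is not None:
--         if cva < cvb:
--             return 1
--         elif cvb < cva:
--             return -1
--     a_better = any(a[i] < b[i] for i in range(len(a)))
--     b_better = any(b[i] < a[i] for i in range(len(a)))
--     if a_better and b_better:
--         return 0
--     elif a_better:
--         return 1
--     elif b_better:
--         return -1
--     else:
--         return 0
-- ===== Notes on version B (the rewrite author's own statement) =====
-- stated objective: simpler
-- what changed: A's stateful single pass with early returns and a val flag is replaced by two side-effect-free any() predicate scans (does a ever beat b, does b ever beat a) combined by a four-way branch.
import Mathlib
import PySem

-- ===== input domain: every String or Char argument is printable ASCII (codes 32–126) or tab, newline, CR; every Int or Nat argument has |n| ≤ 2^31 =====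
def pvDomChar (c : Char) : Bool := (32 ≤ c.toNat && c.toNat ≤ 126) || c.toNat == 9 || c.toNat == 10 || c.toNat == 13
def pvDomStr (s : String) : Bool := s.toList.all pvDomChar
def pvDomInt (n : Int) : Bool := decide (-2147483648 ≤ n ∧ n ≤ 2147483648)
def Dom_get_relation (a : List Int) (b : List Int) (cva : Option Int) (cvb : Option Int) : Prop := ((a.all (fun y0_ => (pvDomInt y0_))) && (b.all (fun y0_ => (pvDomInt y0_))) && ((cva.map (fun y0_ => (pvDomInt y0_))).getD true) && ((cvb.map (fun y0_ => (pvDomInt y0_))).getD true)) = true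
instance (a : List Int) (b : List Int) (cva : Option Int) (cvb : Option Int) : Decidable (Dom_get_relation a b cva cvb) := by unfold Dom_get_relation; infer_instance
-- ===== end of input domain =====

-- B replaces A's stateful early-return loop by two independent "any" predicate scans; return-value equivalence proved on Pre_ (where neither raises IndexError).

-- ===== PORT A =====
-- loop over the index list with the `val` state; early returns become immediate results.
-- a[i]/b[i] are written getD i 0: inside Pre_ every accessed index is in range, so this is exact there.
def grLoopA (a : List Int) (b : List Int) : List Nat → Int → Int
  | [], val => val
  | i :: rest, val =>
    if a.getD i 0 < b.getD i 0 then
      (if val = -1 then 0 else grLoopA a b rest 1)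
    else if b.getD i 0 < a.getD i 0 then
      (if val = 1 then 0 else grLoopA a b rest (-1))
    else grLoopA a b rest val

def get_relation (a : List Int) (b : List Int) (cva : Option Int) (cvb : Option Int) : Int :=
  match cva, cvb with
  | some x, some y =>
    if x < y then 1
    else if y < x then -1
    else grLoopA a b (List.range a.length) 0
  | _, _ => grLoopA a b (List.range a.length) 0

-- ===== PORT B =====
def grDecideB (a : List Int) (b : List Int) : Int :=
  let aBetter := (List.range a.length).any (fun i => a.getD i 0 < b.getD i 0)
  let bBetter := (List.range a.length).any (fun i => b.getD i 0 < a.getD i 0)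
  if aBetter && bBetter then 0
  else if aBetter then 1
  else if bBetter then -1
  else 0

def get_relation_alt (a : List Int) (b : List Int) (cva : Option Int) (cvb : Option Int) : Int :=
  if cva.isSome && cvb.isSome then
    if cva.getD 0 < cvb.getD 0 then 1
    else if cvb.getD 0 < cva.getD 0 then -1
    else grDecideB a b
  else grDecideB a b

-- ===== PRECONDITION & SPEC =====
-- Pre_ admits exactly the inputs on which Python A returns: either the constraint-violation
-- guard decides (cva ≠ cvb), or no out-of-range b-index is reached — i.e. b is long enough,
-- or the loop early-returns 0 because both directions of improvement occur within b's length.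
-- (B raises IndexError at exactly the same inputs, so nothing A returns on is excluded.)
def Pre_get_relation (a : List Int) (b : List Int) (cva : Option Int) (cvb : Option Int) : Prop :=
  (cva.isSome ∧ cvb.isSome ∧ cva ≠ cvb) ∨
  a.length ≤ b.length ∨
  ((∃ i < b.length, a.getD i 0 < b.getD i 0) ∧ (∃ i < b.length, b.getD i 0 < a.getD i 0))
instance (a : List Int) (b : List Int) (cva : Option Int) (cvb : Option Int) : Decidable (Pre_get_relation a b cva cvb) := by unfold Pre_get_relation; infer_instance
def pvWitness_get_relation : List Int × List Int × Option Int × Option Int := ([1, 2], [2, 1], none, some 3)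
def Spec_get_relation (a : List Int) (b : List Int) (cva : Option Int) (cvb : Option Int) (out : Int) : Prop := out = get_relation_alt a b cva cvb
instance (a : List Int) (b : List Int) (cva : Option Int) (cvb : Option Int) (out : Int) : Decidable (Spec_get_relation a b cva cvb out) := by unfold Spec_get_relation; infer_instance

-- ===== CLAIM =====
def Claim_equal_get_relation : Prop := ∀ (a : List Int) (b : List Int) (cva : Option Int) (cvb : Option Int), Dom_get_relation a b cva cvb → Pre_get_relation a b cva cvb → Spec_get_relation a b cva cvb (get_relation a b cva cvb)

-- ===== LEMMAS AND PROOFS =====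
-- Characterisation of A's stateful loop by the two "any" predicates B computes.
lemma grLoopA_eq (a b : List Int) (idxs : List Nat) (val : Int) :
    grLoopA a b idxs val =
      (if idxs.any (fun i => a.getD i 0 < b.getD i 0) && idxs.any (fun i => b.getD i 0 < a.getD i 0) then 0
       else if idxs.any (fun i => a.getD i 0 < b.getD i 0) then (if val = -1 then 0 else 1)
       else if idxs.any (fun i => b.getD i 0 < a.getD i 0) then (if val = 1 then 0 else -1)
       else val) := by
  induction idxs generalizing val with
  | nil => simp [grLoopA]
  | cons i rest ih =>
    by_cases hp : a.getD i 0 < b.getD i 0 <;> by_cases hq : b.getD i 0 < a.getD i 0 <;>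
      simp only [grLoopA, List.any_cons, hp, hq, decide_true, decide_false, Bool.true_or,
        Bool.false_or, if_true, if_false, ih] <;>
      cases hrp : rest.any (fun i => a.getD i 0 < b.getD i 0) <;>
      cases hrq : rest.any (fun i => b.getD i 0 < a.getD i 0) <;>
      simp only [hrp, hrq, Bool.or_true, Bool.or_false, Bool.true_and, Bool.false_and,
        Bool.and_true, Bool.and_false, Bool.true_or, Bool.false_or, if_true, if_false] <;>
      split_ifs <;> omega

lemma grLoopA_zero (a b : List Int) : grLoopA a b (List.range a.length) 0 = grDecideB a b := by
  rw [grLoopA_eq]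
  unfold grDecideB
  cases hp : (List.range a.length).any (fun i => a.getD i 0 < b.getD i 0) <;>
  cases hq : (List.range a.length).any (fun i => b.getD i 0 < a.getD i 0) <;>
    simp [hp, hq]

-- ===== VERDICT =====
theorem get_relation_spec : Claim_equal_get_relation := by
  intro a b cva cvb _ _
  unfold Spec_get_relation get_relation get_relation_alt
  cases cva <;> cases cvb <;>
    simp [grLoopA_zero, Option.getD] <;> split_ifs <;> simp_all
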